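-- pv_equiv track=rewrite | github.com/Ollson2921/CayleyPerms | decorated_patterns/decorated_pattern.py | _row_values
-- ===== SOURCE A (Python) =====
-- def _row_values(
--     word: tuple[int, ...], occ: tuple[int, ...]
-- ) -> list[tuple[int, int]]:
--     if len(occ) == 0:
--         if len(word) == 0:
--             return [(0, 0)]
--         return [(0, max(word) + 1)]
--     values = sorted(set(word[idx] for idx in occ))
--     row_values = [(0, values[0])]
--     for val1, val2 in zip(values, values[1:]):
--         row_values.append((val1, val1 + 1))
--         row_values.append((val1 + 1, val2))
--     row_values.append((values[-1], values[-1] + 1))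
--     row_values.append((values[-1] + 1, max(word) + 1))
--     return row_values
-- ===== SOURCE B (Python) =====
-- def _row_values(word, occ):
--     if len(occ) == 0:
--         if len(word) == 0:
--             return [(0, 0)]
--         return [(0, max(word) + 1)]
--     # Start from the single interval covering everything, then refine it one
--     # selected value at a time: v splits the first interval (lo, hi) with
--     # v < hi into (lo, v), (v, v+1), (v+1, hi).  The result is independent of
--     # the order the values are inserted in, so no sort is needed.
--     intervals = [(0, max(word) + 1)]
--     for v in {word[idx] for idx in occ}:
--         new = []
--         for i, (lo, hi) in enumerate(intervals):
--             if v < hi: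
--                 new.extend([(lo, v), (v, v + 1), (v + 1, hi)])
--                 new.extend(intervals[i + 1:])
--                 break
--             new.append((lo, hi))
--         intervals = new
--     return intervals
-- ===== Notes on version B (the rewrite author's own statement) =====
-- stated objective: alternative
-- what changed: A sorts the distinct selected values and emits the interval list in one left-to-right pass with hand-written first/last intervals; B never sorts: it starts from the single interval (0, max(word)+1) and refines it incrementally, inserting each distinct value v (in arbitrary order) by splitting the first interval (lo, hi) with v < hi into (lo, v), (v, v+1), (v+1, hi) - the result is order-independent.
import Mathlib
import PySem

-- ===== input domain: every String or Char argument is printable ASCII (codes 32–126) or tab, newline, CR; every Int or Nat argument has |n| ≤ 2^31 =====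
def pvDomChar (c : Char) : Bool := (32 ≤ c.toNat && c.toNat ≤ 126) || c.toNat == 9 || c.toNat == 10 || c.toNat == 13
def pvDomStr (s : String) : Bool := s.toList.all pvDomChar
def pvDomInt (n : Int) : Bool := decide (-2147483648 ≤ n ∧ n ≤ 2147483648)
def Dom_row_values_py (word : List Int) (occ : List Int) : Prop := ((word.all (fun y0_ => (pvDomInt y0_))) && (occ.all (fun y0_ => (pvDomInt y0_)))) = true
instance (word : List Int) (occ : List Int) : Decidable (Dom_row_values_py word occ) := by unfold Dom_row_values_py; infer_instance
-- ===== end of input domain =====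

-- B replaces A's sort-then-emit pass by incremental interval refinement: each distinct
-- selected value splits the first interval it fits in; no sorting. Objective: alternative.

-- ===== PORT A =====
def row_values_py (word : List Int) (occ : List Int) : List (Int × Int) :=
  if occ.length = 0 then
    if word.length = 0 then [(0, 0)]
    else [(0, (PySem.List.max? word (fun x => x)).getD 0 + 1)]
  else
    let values := PySem.List.sorted (PySem.Set.ofList (occ.map (fun idx => PySem.List.pyGetD word idx 0))) (fun x => x) false
    let rv := (values.zip values.tail).foldl
      (fun acc p => acc ++ [(p.1, p.1 + 1), (p.1 + 1, p.2)]) [(0, PySem.List.pyGetD values 0 0)]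
    let last := PySem.List.pyGetD values (-1) 0
    rv ++ [(last, last + 1), (last + 1, (PySem.List.max? word (fun x => x)).getD 0 + 1)]

-- ===== PORT B =====
-- B's inner loop: scan the intervals, split the first (lo, hi) with v < hi, keep the rest.
def pvInsert (v : Int) : List (Int × Int) → List (Int × Int)
  | [] => []
  | (lo, hi) :: rest =>
      if v < hi then (lo, v) :: (v, v + 1) :: (v + 1, hi) :: rest
      else (lo, hi) :: pvInsert v rest

def row_values_py_alt (word : List Int) (occ : List Int) : List (Int × Int) :=
  if occ.length = 0 then
    if word.length = 0 then [(0, 0)]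
    else [(0, (PySem.List.max? word (fun x => x)).getD 0 + 1)]
  else
    (PySem.Set.ofList (occ.map (fun idx => PySem.List.pyGetD word idx 0))).foldl
      (fun ivs v => pvInsert v ivs)
      [(0, (PySem.List.max? word (fun x => x)).getD 0 + 1)]

-- ===== PRECONDITION & SPEC =====
-- Pre_ excludes exactly the inputs where A raises IndexError: some index in occ out of range for word.
def Pre_row_values_py (word : List Int) (occ : List Int) : Prop :=
  ∀ idx ∈ occ, PySem.Raise.InRange word.length idx
instance (word : List Int) (occ : List Int) : Decidable (Pre_row_values_py word occ) := by unfold Pre_row_values_py; infer_instance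
def pvWitness_row_values_py : List Int × List Int := ([3, 1, 2], [0, 2])

def Spec_row_values_py (word : List Int) (occ : List Int) (out : List (Int × Int)) : Prop := out = row_values_py_alt word occ
instance (word : List Int) (occ : List Int) (out : List (Int × Int)) : Decidable (Spec_row_values_py word occ out) := by unfold Spec_row_values_py; infer_instance

-- ===== CLAIM (what is proved, stated in full; the proofs are below) =====
def Claim_equal_row_values_py : Prop := ∀ (word : List Int) (occ : List Int), Dom_row_values_py word occ → Pre_row_values_py word occ → Spec_row_values_py word occ (row_values_py word occ)

-- ===== LEMMAS AND PROOFS =====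

-- the refinement of the interval (a, M) by an increasing list of values
def pvRef (a : Int) : List Int → Int → List (Int × Int)
  | [], M => [(a, M)]
  | v :: vs, M => (a, v) :: (v, v + 1) :: pvRef (v + 1) vs M

-- inserting v into a refinement = refining by the list with v inserted in order
lemma pv_insert_ref (v : Int) (vs : List Int) (a M : Int) (hvM : v < M) (hv : v ∉ vs) :
    pvInsert v (pvRef a vs M) = pvRef a (vs.orderedInsert (· ≤ ·) v) M := by
  induction vs generalizing a with
  | nil => simp [pvRef, pvInsert, hvM, List.orderedInsert]
  | cons w ws ih =>
      simp only [List.mem_cons, not_or] at hv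
      by_cases hvw : v ≤ w
      · have hlt : v < w := lt_of_le_of_ne hvw hv.1
        simp [pvRef, pvInsert, hlt, List.orderedInsert, hvw]
      · have h1 : ¬ v < w := by omega
        have h2 : ¬ v < w + 1 := by omega
        simp [pvRef, pvInsert, h1, h2, List.orderedInsert, hvw, ih _ hv.2]

-- B's fold of pvInsert computes the refinement by the insertion-sorted value list
lemma pv_fold_ref (S : List Int) (acc : List Int) (M : Int)
    (hS : ∀ v ∈ S, v < M) (hdis : ∀ v ∈ S, v ∉ acc) (hnd : S.Nodup) :
    S.foldl (fun ivs v => pvInsert v ivs) (pvRef 0 acc M)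
      = pvRef 0 (S.foldl (fun l v => l.orderedInsert (· ≤ ·) v) acc) M := by
  induction S generalizing acc with
  | nil => rfl
  | cons v S ih =>
      simp only [List.foldl_cons]
      rw [pv_insert_ref v acc 0 M (hS v (by simp)) (hdis v (by simp))]
      exact ih _ (fun w hw => hS w (by simp [hw]))
        (fun w hw => by
          rw [List.mem_orderedInsert]
          rintro (rfl | hmem)
          · exact (List.nodup_cons.1 hnd).1 hw
          · exact hdis w (by simp [hw]) hmem)
        (List.nodup_cons.1 hnd).2

lemma pv_fold_insertSort_perm (S acc : List Int) :
    (S.foldl (fun l v => l.orderedInsert (· ≤ ·) v) acc).Perm (S ++ acc) := by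
  induction S generalizing acc with
  | nil => simp
  | cons v S ih =>
      simp only [List.foldl_cons]
      refine ((ih _).trans ?_)
      have h1 : (S ++ acc.orderedInsert (· ≤ ·) v).Perm (S ++ v :: acc) :=
        List.Perm.append_left S (List.perm_orderedInsert _ _ _)
      have h2 : (S ++ v :: acc).Perm (v :: (S ++ acc)) := List.perm_middle
      simpa using h1.trans h2

lemma pv_fold_insertSort_sorted (S acc : List Int) (hacc : acc.Pairwise (· ≤ ·)) :
    (S.foldl (fun l v => l.orderedInsert (· ≤ ·) v) acc).Pairwise (· ≤ ·) := by
  induction S generalizing acc with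
  | nil => exact hacc
  | cons v S ih => exact ih _ (List.Pairwise.orderedInsert v acc hacc)

-- A's tail-building pass equals the structural refinement
lemma pv_A_tail_ref (v : Int) (vs : List Int) (M : Int) :
    (v, v + 1) :: pvRef (v + 1) vs M
      = ((v :: vs).zip vs).flatMap (fun p => [(p.1, p.1 + 1), (p.1 + 1, p.2)])
        ++ [((v :: vs).getLast (by simp), (v :: vs).getLast (by simp) + 1),
            ((v :: vs).getLast (by simp) + 1, M)] := by
  induction vs generalizing v with
  | nil => simp [pvRef]
  | cons w ws ih =>
      have h := ih w
      simp only [List.zip_cons_cons, List.flatMap_cons, List.cons_append, pvRef] at *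
      rw [h]
      simp [List.getLast]

theorem row_values_py_spec : Claim_equal_row_values_py := by
  intro word occ _ hpre
  unfold Spec_row_values_py row_values_py row_values_py_alt
  by_cases hocc : occ.length = 0
  · simp [hocc]
  · simp only [hocc, reduceIte]
    set S := PySem.Set.ofList (occ.map (fun idx => PySem.List.pyGetD word idx 0)) with hSdef
    set values := PySem.List.sorted S (fun x => x) false with hv
    set M := (PySem.List.max? word (fun x => x)).getD 0 + 1 with hM
    -- every selected value is an element of word, hence < M
    have hmemword : ∀ x ∈ S, x ∈ word := by
      intro x hx
      rw [hSdef, PySem.Set.mem_ofList, List.mem_map] at hx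
      obtain ⟨idx, hidx, rfl⟩ := hx
      exact PySem.List.pyGetD_mem _ _ (hpre idx hidx)
    have hwne : word ≠ [] := by
      obtain ⟨a, as, rfl⟩ : ∃ a as, occ = a :: as := by
        cases occ with
        | nil => simp at hocc
        | cons a as => exact ⟨a, as, rfl⟩
      have := hpre a (by simp)
      unfold PySem.Raise.InRange at this
      intro h; rw [h] at this; simp at this; omega
    obtain ⟨m, hm⟩ : ∃ m, PySem.List.max? word (fun x => x) = some m := by
      rcases h : PySem.List.max? word (fun x => x) with _ | m
      · exact absurd ((PySem.List.max?_eq_none_iff word (fun x => x)).1 h) hwne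
      · exact ⟨m, rfl⟩
    have hSM : ∀ x ∈ S, x < M := by
      intro x hx
      have h2 : x ≤ m := by simpa using PySem.List.max?_isMax hm x (hmemword x hx)
      rw [hM, hm]; simp only [Option.getD_some]; omega
    -- B's side: fold of pvInsert = refinement by the insertion-sorted list
    have hB : S.foldl (fun ivs v => pvInsert v ivs) [(0, M)]
        = pvRef 0 (S.foldl (fun l v => l.orderedInsert (· ≤ ·) v) []) M := by
      have := pv_fold_ref S [] M hSM (by simp) (by rw [hSdef]; exact PySem.Set.nodup_ofList _)
      simpa [pvRef] using this
    set sAcc := S.foldl (fun l v => l.orderedInsert (· ≤ ·) v) [] with hsAcc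
    -- sAcc is the sorted order of S
    have hperm : sAcc.Perm S := by simpa using pv_fold_insertSort_perm S []
    have hsorted : sAcc.Pairwise (· ≤ ·) := pv_fold_insertSort_sorted S [] (by simp)
    have hndS : S.Nodup := by rw [hSdef]; exact PySem.Set.nodup_ofList _
    have hnd : sAcc.Nodup := hperm.nodup_iff.2 hndS
    have hlt : sAcc.Pairwise (· < ·) := by
      have := hsorted.and hnd
      exact this.imp (fun h => lt_of_le_of_ne h.1 h.2)
    have hvals : values = sAcc :=
      PySem.List.sorted_eq_of_perm_of_pairwise_lt _ _ _ hperm hlt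
    -- A's side: the append-building pass = refinement by values
    have hne : values ≠ [] := by
      obtain ⟨a, as, rfl⟩ : ∃ a as, occ = a :: as := by
        cases occ with
        | nil => simp at hocc
        | cons a as => exact ⟨a, as, rfl⟩
      have hmem : PySem.List.pyGetD word a 0 ∈ values := by
        rw [hv, PySem.List.mem_sorted, PySem.Set.mem_ofList]
        simp
      intro h; rw [h] at hmem; simp at hmem
    obtain ⟨v, vs, hvs⟩ := List.exists_cons_of_ne_nil hne
    rw [hvs]
    rw [PySem.List.foldl_append_eq_flatMap (fun p : Int × Int => [(p.1, p.1 + 1), (p.1 + 1, p.2)])]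
    rw [PySem.List.pyGetD_neg_one (v :: vs) 0 (by simp)]
    simp only [PySem.List.pyGetD_zero_cons, List.tail_cons]
    rw [hB, ← hvals, hvs]
    have h := pv_A_tail_ref v vs M
    simp only [pvRef, List.cons_append, List.nil_append]
    rw [h]
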